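-- pv_equiv track=rewrite | github.com/KhongCL/MCC-2023 | MCC 2023 rectangle.py | split_into_k_groups
-- ===== SOURCE A (Python) =====
-- def split_into_k_groups(lst, k):
--   # If the list is empty or k is zero, return an empty list
--   if not lst or k == 0:
--     return []
--   # If k is one, return the list as a single group
--   if k == 1:
--     return [[lst]]
--   # Initialize the result list
--   result = []
--   # Loop through all possible lengths of the first group
--   for i in range(1, len(lst) - k + 2):
--     # Split the rest of the list into k - 1 groups recursively
--     rest = split_into_k_groups(lst[i:], k - 1)
--     # Add the first group and the rest of the groups to the result list
--     for r in rest: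
--       result.append([lst[:i]] + r)
--   # Return the result list
--   return result
-- ===== SOURCE B (Python) =====
-- def split_into_k_groups(lst, k):
--     # Bottom-up DP over suffixes: table[i] holds every split of lst[i:] into
--     # j groups; one layer per group count, so no suffix is ever recomputed.
--     n = len(lst)
--     if not lst or k <= 0 or k > n:
--         return []
--     table = [[[lst[i:]]] for i in range(n)] + [[]]
--     for j in range(2, k + 1):
--         table = [[[lst[i:i + m]] + r
--                   for m in range(1, n - i - j + 2)
--                   for r in table[i + m]]
--                  for i in range(n)] + [[]]
--     return table[0]
-- ===== Notes on version B (the rewrite author's own statement) =====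
-- stated objective: alternative
-- what changed: Replaces A's top-down recursion (which re-solves the same (suffix, groups) subproblem once per caller) by a bottom-up DP that builds one table per group count, each suffix's partition list computed exactly once.
import Mathlib
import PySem

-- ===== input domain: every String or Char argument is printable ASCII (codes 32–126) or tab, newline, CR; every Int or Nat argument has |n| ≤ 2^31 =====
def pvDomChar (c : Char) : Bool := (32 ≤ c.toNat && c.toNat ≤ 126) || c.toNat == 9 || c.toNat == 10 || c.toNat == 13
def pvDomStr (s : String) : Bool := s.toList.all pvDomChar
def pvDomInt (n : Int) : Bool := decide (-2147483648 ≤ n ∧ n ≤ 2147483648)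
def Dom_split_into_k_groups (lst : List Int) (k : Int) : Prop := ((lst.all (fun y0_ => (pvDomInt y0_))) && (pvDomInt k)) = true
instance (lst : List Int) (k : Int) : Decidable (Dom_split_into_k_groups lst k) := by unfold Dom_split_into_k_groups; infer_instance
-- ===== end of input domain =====

-- B replaces A's top-down recursion by a bottom-up DP over suffixes (one table per
-- group count), an alternative algorithm that computes each subproblem once.

-- ===== PORT A =====
-- A's recursion, made structural with a fuel parameter (fuel = lst.length + 1 always
-- suffices: every recursive call drops i ≥ 1 elements from the list).
def splitA_fuel (fuel : Nat) (lst : List Int) (k : Int) : List (List (List Int)) :=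
  match fuel with
  | 0 => []
  | Nat.succ fuel' =>
    if lst = [] ∨ k = 0 then []
    else if k = 1 then [[lst]]
    else
      (PySem.List.pyRange 1 (PySem.List.len lst - k + 2)).foldl
        (fun result i =>
          let rest := splitA_fuel fuel' (PySem.List.slice lst (some i) none) (k - 1)
          rest.foldl (fun result r => result ++ [PySem.List.slice lst none (some i) :: r]) result)
        []

def split_into_k_groups (lst : List Int) (k : Int) : List (List (List Int)) :=
  splitA_fuel (lst.length + 1) lst k

-- ===== PORT B =====
def split_into_k_groups_alt (lst : List Int) (k : Int) : List (List (List Int)) :=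
  let n : Int := PySem.List.len lst
  if lst = [] ∨ k ≤ 0 ∨ n < k then []
  else
    let table0 := (PySem.List.pyRange 0 n).map (fun i => [[PySem.List.slice lst (some i) none]]) ++ [[]]
    let table := (PySem.List.pyRange 2 (k + 1)).foldl
      (fun table j =>
        (PySem.List.pyRange 0 n).map (fun i =>
          (PySem.List.pyRange 1 (n - i - j + 2)).flatMap (fun m =>
            (PySem.List.pyGetD table (i + m) []).map
              (fun r => PySem.List.slice lst (some i) (some (i + m)) :: r))) ++ [[]])
      table0
    PySem.List.pyGetD table 0 []  -- table[0]; table is never empty (it ends in [[]])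

-- ===== PRECONDITION & SPEC =====
def Spec_split_into_k_groups (lst : List Int) (k : Int) (out : List (List (List Int))) : Prop := out = split_into_k_groups_alt lst k
instance (lst : List Int) (k : Int) (out : List (List (List Int))) : Decidable (Spec_split_into_k_groups lst k out) := by unfold Spec_split_into_k_groups; infer_instance

-- ===== CLAIM (what is proved, stated in full; the proofs are below) =====
def Claim_equal_split_into_k_groups : Prop := ∀ (lst : List Int) (k : Int), Dom_split_into_k_groups lst k → Spec_split_into_k_groups lst k (split_into_k_groups lst k)

-- ===== LEMMAS AND PROOFS =====

-- The common mathematical value: all splits of xs into j ordered nonempty contiguous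
-- groups, first-cut-outermost, in both programs' enumeration order.
def part : List Int → Nat → List (List (List Int))
  | _, 0 => []
  | xs, 1 => if xs = [] then [] else [[xs]]
  | xs, (j+2) =>
    (List.range (xs.length - (j+1))).flatMap
      (fun t => (part (xs.drop (t+1)) (j+1)).map (fun r => xs.take (t+1) :: r))

theorem part_nil (j : Nat) : part [] j = [] := by
  match j with
  | 0 => rfl
  | 1 => simp [part]
  | j+2 => simp [part]

theorem part_eq_nil_of_lt {xs : List Int} {j : Nat} (h : xs.length < j) : part xs j = [] := by
  match j with
  | 0 => exact absurd h (by omega)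
  | 1 =>
    have : xs = [] := by cases xs <;> simp_all
    simp [part, this]
  | j+2 =>
    have : xs.length - (j+1) = 0 := by omega
    simp [part, this]

theorem A_nonpos : ∀ (fuel : Nat) (xs : List Int) (k : Int), k ≤ 0 → splitA_fuel fuel xs k = [] := by
  intro fuel
  induction fuel with
  | zero => intro xs k _; rfl
  | succ f ih =>
    intro xs k hk
    unfold splitA_fuel
    by_cases hx : xs = []
    · rw [if_pos (Or.inl hx)]
    · by_cases hk0 : k = 0
      · rw [if_pos (Or.inr hk0)]
      · rw [if_neg (by simp [hx, hk0]), if_neg (by omega)]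
        have hz : ∀ i : Int, splitA_fuel f (PySem.List.slice xs (some i) none) (k - 1) = [] :=
          fun i => ih _ _ (by omega)
        simp only [hz, List.foldl_nil]
        exact List.foldl_fixed _

theorem A_eq_part : ∀ (fuel : Nat) (xs : List Int) (j : Nat), 1 ≤ j → xs.length < fuel →
    splitA_fuel fuel xs (j : Int) = part xs j := by
  intro fuel
  induction fuel with
  | zero => intro xs j _ h; omega
  | succ f ih =>
    intro xs j hj hlen
    by_cases hx : xs = []
    · subst hx
      rw [part_nil]
      unfold splitA_fuel
      rw [if_pos (Or.inl rfl)]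
    · have hx1 : 1 ≤ xs.length := by
        cases xs with
        | nil => exact absurd rfl hx
        | cons a t => simp
      match j, hj with
      | 1, _ =>
        unfold splitA_fuel
        rw [if_neg (by simp [hx]), if_pos (by norm_num)]
        simp [part, hx]
      | (t+2), _ =>
        unfold splitA_fuel
        rw [if_neg (by push_cast; simp [hx]; omega), if_neg (by push_cast; omega)]
        simp only [PySem.List.foldl_append_singleton_eq_map, PySem.List.foldl_append_eq_flatMap,
          List.nil_append, PySem.List.len_eq, PySem.List.pyRange_one, List.flatMap_map]
        rw [show (((xs.length : Int) - ↑(t+2) + 2) - 1).toNat = xs.length - (t+1) from by omega]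
        simp only [part]
        apply List.flatMap_congr
        intro u hu
        rw [List.mem_range] at hu
        rw [PySem.List.slice_from xs (by omega), PySem.List.slice_to xs (by omega),
          show ((1 : Int) + ↑u).toNat = u + 1 from by omega,
          show (↑(t+2) : Int) - 1 = ((t+1 : Nat) : Int) from by push_cast; ring]
        rw [ih (xs.drop (u+1)) (t+1) (by omega) (by simp; omega)]

-- the DP table after processing group counts 2..J
def tbl (lst : List Int) (J : Nat) : List (List (List (List Int))) :=
  (List.range lst.length).map (fun i => part (lst.drop i) J) ++ [[]]

theorem B_fold (lst : List Int) (J : Nat) (hJ : 1 ≤ J) :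
    (PySem.List.pyRange 2 ((J : Int) + 1)).foldl
      (fun table j =>
        (PySem.List.pyRange 0 (PySem.List.len lst)).map (fun i =>
          (PySem.List.pyRange 1 (PySem.List.len lst - i - j + 2)).flatMap (fun m =>
            (PySem.List.pyGetD table (i + m) []).map
              (fun r => PySem.List.slice lst (some i) (some (i + m)) :: r))) ++ [[]])
      ((PySem.List.pyRange 0 (PySem.List.len lst)).map (fun i => [[PySem.List.slice lst (some i) none]]) ++ ([[]] : List (List (List (List Int)))))
    = tbl lst J := by
  induction J, hJ using Nat.le_induction with
  | base =>
    rw [show ((1:Nat):Int) + 1 = 2 from by norm_num, PySem.List.pyRange_one_eq_nil (le_refl 2),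
      List.foldl_nil]
    unfold tbl
    rw [PySem.List.len_eq, PySem.List.pyRange_zero_nat, List.map_map]
    congr 1
    apply List.map_congr_left
    intro a ha
    rw [List.mem_range] at ha
    have hd : lst.drop a ≠ [] := by rw [ne_eq, List.drop_eq_nil_iff]; omega
    simp only [Function.comp_apply, PySem.List.slice_from_natCast]
    simp [part, hd]
  | succ J hJ1 ih =>
    rw [show (((J+1:Nat)):Int) + 1 = ((J:Int)+1) + 1 from by push_cast; ring,
      PySem.List.pyRange_one_succ_right (by omega), List.foldl_append, ih,
      List.foldl_cons, List.foldl_nil]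
    unfold tbl
    rw [PySem.List.len_eq, PySem.List.pyRange_zero_nat, List.map_map]
    congr 1
    apply List.map_congr_left
    intro a ha
    rw [List.mem_range] at ha
    simp only [Function.comp_apply]
    obtain ⟨s, rfl⟩ : ∃ s, J = s + 1 := ⟨J - 1, by omega⟩
    simp only [part, List.length_drop]
    rw [PySem.List.pyRange_one, List.flatMap_map]
    rw [show (((lst.length:Int) - ↑a - (((s+1:Nat):Int)+1) + 2) - 1).toNat
        = (lst.length - a) - (s+1+1-1) from by push_cast; omega]
    apply List.flatMap_congr
    intro u hu
    rw [List.mem_range] at hu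
    have hidx : a + (u + 1) < lst.length := by omega
    rw [show ((1:Int) + ↑u) = ((u+1 : Nat) : Int) from by push_cast; ring]
    rw [PySem.List.slice_natCast_add]
    rw [show (↑a:Int) + ((u+1:Nat):Int) = ((a+(u+1):Nat):Int) from by push_cast; ring]
    rw [PySem.List.pyGetD_natCast]
    rw [List.getD_append _ _ _ _ (by simpa using hidx)]
    rw [List.getD_eq_getElem _ _ (by simpa using hidx)]
    simp only [List.getElem_map, List.getElem_range]
    rw [List.drop_drop]

theorem B_eq_part (lst : List Int) (k : Int) (hne : lst ≠ []) (hk : 1 ≤ k) (hkn : k ≤ (lst.length : Int)) :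
    split_into_k_groups_alt lst k = part lst k.toNat := by
  have hK : 1 ≤ k.toNat := by omega
  have hn : 1 ≤ lst.length := by
    cases lst with
    | nil => exact absurd rfl hne
    | cons a t => simp
  unfold split_into_k_groups_alt
  dsimp only
  rw [if_neg (by simp only [PySem.List.len_eq]; push Not; exact ⟨hne, by omega, by omega⟩)]
  rw [show k = ((k.toNat : Nat) : Int) from by omega]
  rw [B_fold lst k.toNat hK]
  unfold tbl
  rw [PySem.List.pyGetD_zero, List.getD_append _ _ _ _ (by simpa using hn)]
  rw [List.getD_eq_getElem _ _ (by simpa using hn)]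
  simp only [List.getElem_map, List.getElem_range, List.drop_zero, Int.toNat_natCast]

-- ===== VERDICT (by name: the statement is the Claim_ definition above) =====
theorem split_into_k_groups_spec : Claim_equal_split_into_k_groups := by
  intro lst k _dom
  unfold Spec_split_into_k_groups
  by_cases hk0 : k ≤ 0
  · have hA := A_nonpos (lst.length + 1) lst k hk0
    unfold split_into_k_groups split_into_k_groups_alt
    simp only [hA]
    rw [if_pos (by right; left; exact hk0)]
  · rw [not_le] at hk0
    by_cases hne : lst = []
    · subst hne
      unfold split_into_k_groups split_into_k_groups_alt splitA_fuel
      simp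
    · by_cases hkn : k ≤ (lst.length : Int)
      · have hA := A_eq_part (lst.length + 1) lst k.toNat (by omega) (by omega)
        rw [B_eq_part lst k hne hk0 hkn]
        unfold split_into_k_groups
        rw [show ((k.toNat : Int)) = k by omega] at hA
        exact hA
      · rw [not_le] at hkn
        have hA := A_eq_part (lst.length + 1) lst k.toNat (by omega) (by omega)
        unfold split_into_k_groups
        rw [show ((k.toNat : Int)) = k by omega] at hA
        rw [hA, part_eq_nil_of_lt (by omega)]
        unfold split_into_k_groups_alt
        rw [if_pos (by right; right; exact hkn)]
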